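-- pv_equiv track=rewrite | github.com/theabbie/leetcode | merge-similar-items.py | mergeSimilarItems
-- ===== SOURCE A (Python) =====
-- from typing import List
--
-- from collections import defaultdict
--
-- def mergeSimilarItems(items1: List[List[int]], items2: List[List[int]]) -> List[List[int]]:
--     weights = defaultdict(int)
--     for v, w in items1:
--         weights[v] += w
--     for v, w in items2:
--         weights[v] += w
--     res = []
--     for v in sorted(weights.keys()):
--         res.append([v, weights[v]])
--     return res
-- ===== SOURCE B (Python) =====
-- from typing import List
--
-- def mergeSimilarItems(items1: List[List[int]], items2: List[List[int]]) -> List[List[int]]: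
--     # Sort the concatenation by value, then one linear pass summing each run.
--     pairs = sorted(items1 + items2, key=lambda it: it[0])
--     res = []
--     i, n = 0, len(pairs)
--     while i < n:
--         v, total = pairs[i][0], pairs[i][1]
--         i += 1
--         while i < n and pairs[i][0] == v:
--             total += pairs[i][1]
--             i += 1
--         res.append([v, total])
--     return res
-- ===== Notes on version B (the rewrite author's own statement) =====
-- stated objective: alternative
-- what changed: Replaces the defaultdict accumulation plus key sort by sorting the concatenated item list by value once and summing each consecutive run of equal values in a single linear pass, maintaining no dictionary.
import Mathlib
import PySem

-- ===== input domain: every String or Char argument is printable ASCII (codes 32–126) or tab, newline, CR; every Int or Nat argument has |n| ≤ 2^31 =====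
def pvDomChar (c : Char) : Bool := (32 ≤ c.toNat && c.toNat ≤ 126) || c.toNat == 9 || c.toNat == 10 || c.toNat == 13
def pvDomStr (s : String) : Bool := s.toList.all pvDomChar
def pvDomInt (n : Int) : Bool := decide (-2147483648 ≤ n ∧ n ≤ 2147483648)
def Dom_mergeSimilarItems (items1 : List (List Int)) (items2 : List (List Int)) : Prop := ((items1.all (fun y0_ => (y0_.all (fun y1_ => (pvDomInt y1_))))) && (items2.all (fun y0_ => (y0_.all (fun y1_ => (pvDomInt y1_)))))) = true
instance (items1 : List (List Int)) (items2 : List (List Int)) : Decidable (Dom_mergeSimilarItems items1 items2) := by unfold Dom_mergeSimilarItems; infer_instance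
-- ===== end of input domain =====

-- B replaces A's defaultdict-then-sort-keys by sort-the-pairs-then-sum-runs (same cost, no dict).

-- 'v' / 'w' of an item [v, w] (it[0] / it[1]); shared by both ports.
def pvKey (it : List Int) : Int := PySem.List.pyGetD it 0 0
def pvWt (it : List Int) : Int := PySem.List.pyGetD it 1 0

-- ===== PORT A =====
def mergeSimilarItems (items1 : List (List Int)) (items2 : List (List Int)) : List (List Int) :=
  -- weights = defaultdict(int); for v, w in items1: weights[v] += w; same for items2
  let w1 := items1.foldl (fun d it => d.modify (pvKey it) 0 (· + pvWt it)) PySem.Dict.empty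
  let w2 := items2.foldl (fun d it => d.modify (pvKey it) 0 (· + pvWt it)) w1
  -- res = []; for v in sorted(weights.keys()): res.append([v, weights[v]])
  (PySem.List.sorted w2.keys (fun v => v) false).foldl
    (fun res v => res ++ [[v, w2.getD v 0]]) []

-- ===== PORT B =====
-- inner while: consume the run of items whose value equals v, adding their weights to t
def pvRun (v t : Int) : List (List Int) → Int × List (List Int)
  | [] => (t, [])
  | it :: rest => if pvKey it = v then pvRun v (t + pvWt it) rest else (t, it :: rest)

theorem pvRun_snd_length_le (v t : Int) (l : List (List Int)) : (pvRun v t l).2.length ≤ l.length := by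
  induction l generalizing t with
  | nil => simp [pvRun]
  | cons it rest ih =>
    simp only [pvRun]
    split
    · exact le_trans (ih _) (Nat.le_succ _)
    · exact le_refl _

-- outer while: one group per run
def pvGroup : List (List Int) → List (List Int)
  | [] => []
  | it :: rest =>
    let r := pvRun (pvKey it) (pvWt it) rest
    [pvKey it, r.1] :: pvGroup r.2
  termination_by l => l.length
  decreasing_by
    simpa using Nat.lt_succ_of_le (pvRun_snd_length_le (pvKey it) (pvWt it) rest)

def mergeSimilarItems_alt (items1 : List (List Int)) (items2 : List (List Int)) : List (List Int) :=
  pvGroup (PySem.List.sorted (items1 ++ items2) (fun it => pvKey it) false)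

-- ===== PRECONDITION & SPEC =====
-- Pre_ excludes inputs containing an item whose length is not 2: Python A's 'for v, w in items'
-- raises ValueError (unpacking) on such an item, so A returns no value there.
def Pre_mergeSimilarItems (items1 : List (List Int)) (items2 : List (List Int)) : Prop :=
  (∀ it ∈ items1, it.length = 2) ∧ (∀ it ∈ items2, it.length = 2)
instance (items1 : List (List Int)) (items2 : List (List Int)) : Decidable (Pre_mergeSimilarItems items1 items2) := by unfold Pre_mergeSimilarItems; infer_instance

def pvWitness_mergeSimilarItems : List (List Int) × List (List Int) := ([[1, 2], [3, 4]], [[1, 5]])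

def Spec_mergeSimilarItems (items1 : List (List Int)) (items2 : List (List Int)) (out : List (List Int)) : Prop := out = mergeSimilarItems_alt items1 items2
instance (items1 : List (List Int)) (items2 : List (List Int)) (out : List (List Int)) : Decidable (Spec_mergeSimilarItems items1 items2 out) := by unfold Spec_mergeSimilarItems; infer_instance

-- ===== CLAIM (what is proved, stated in full; the proofs are below) =====
def Claim_equal_mergeSimilarItems : Prop := ∀ (items1 : List (List Int)) (items2 : List (List Int)), Dom_mergeSimilarItems items1 items2 → Pre_mergeSimilarItems items1 items2 → Spec_mergeSimilarItems items1 items2 (mergeSimilarItems items1 items2)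

-- ===== LEMMAS AND PROOFS =====

-- total weight of value v in an item list
def pvW (l : List (List Int)) (v : Int) : Int :=
  ((l.filter (fun it => pvKey it == v)).map pvWt).sum

theorem pvW_perm {l l' : List (List Int)} (h : l.Perm l') (v : Int) : pvW l v = pvW l' v := by
  unfold pvW
  exact ((h.filter _).map _).sum_eq

-- A-side: the dict's getD is the weight sum
theorem pv_getD_fold (l : List (List Int)) (d : PySem.Dict Int Int) (v : Int) :
    (l.foldl (fun d it => d.modify (pvKey it) 0 (· + pvWt it)) d).getD v 0
      = d.getD v 0 + pvW l v := by
  induction l generalizing d with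
  | nil => simp [pvW]
  | cons it rest ih =>
    simp only [List.foldl_cons, ih, pvW, List.filter_cons]
    rw [PySem.Dict.getD_modify]
    by_cases h : v = pvKey it
    · simp [h, add_assoc]
    · have h' : (pvKey it == v) = false := by simp only [beq_eq_false_iff_ne, ne_eq]; exact fun e => h e.symm
      simp [h, h']

-- folding Set.add over elements already present changes nothing
theorem pv_foldl_add_of_mem {xs s : List Int} (h : ∀ x ∈ xs, x ∈ s) :
    xs.foldl PySem.Set.add s = s := by
  induction xs with
  | nil => rfl
  | cons x rest ih =>
    have hx : PySem.Set.add s x = s := by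
      have := h x (by simp)
      simp [PySem.Set.add, PySem.Set.contains, this]
    simp only [List.foldl_cons, hx]
    exact ih (fun y hy => h y (by simp [hy]))

-- folding Set.add over elements all distinct from the head keeps the head in front
theorem pv_foldl_add_cons {xs : List Int} {v : Int} (h : v ∉ xs) (s : List Int) :
    xs.foldl PySem.Set.add (v :: s) = v :: xs.foldl PySem.Set.add s := by
  induction xs generalizing s with
  | nil => rfl
  | cons x rest ih =>
    have hxv : x ≠ v := fun e => h (by simp [e])
    have : PySem.Set.add (v :: s) x = v :: PySem.Set.add s x := by
      simp only [PySem.Set.add, PySem.Set.contains, List.contains_cons]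
      have : (x == v) = false := by simp [hxv]
      rw [this]
      simp only [Bool.false_or]
      split <;> rfl
    simp only [List.foldl_cons, this]
    exact ih (fun e => h (by simp [e])) _

-- Set.ofList is a sublist of its input
theorem pv_foldl_add_sublist (xs s : List Int) : List.Sublist (xs.foldl PySem.Set.add s) (s ++ xs) := by
  induction xs generalizing s with
  | nil => simp
  | cons x rest ih =>
    simp only [List.foldl_cons]
    refine (ih (PySem.Set.add s x)).trans ?_
    by_cases hc : PySem.Set.contains s x = true
    · have hm : x ∈ s := by simpa [PySem.Set.contains] using hc
      have h : PySem.Set.add s x = s := by simp [PySem.Set.add, PySem.Set.contains, hm]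
      rw [h]
      exact List.append_sublist_append_left s |>.mpr (List.sublist_cons_self x rest)
    · have hm : x ∉ s := by simpa [PySem.Set.contains] using hc
      have h : PySem.Set.add s x = s ++ [x] := by simp [PySem.Set.add, PySem.Set.contains, hm]
      rw [h, List.append_assoc]
      simp

theorem pv_ofList_sublist (xs : List Int) : List.Sublist (PySem.Set.ofList xs : List Int) xs := by
  have := pv_foldl_add_sublist xs []
  simpa [PySem.Set.ofList_eq_foldl] using this

-- run characterisation: pvRun consumes exactly the leading run of value v
theorem pvRun_spec (v t : Int) (l : List (List Int)) :
    pvRun v t l = (t + ((l.takeWhile (fun it => pvKey it == v)).map pvWt).sum,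
                   l.dropWhile (fun it => pvKey it == v)) := by
  induction l generalizing t with
  | nil => simp [pvRun]
  | cons it rest ih =>
    by_cases h : pvKey it = v
    · simp [pvRun, h, ih, add_assoc]
    · simp [pvRun, h]

-- the grouped output of a key-sorted list: one [v, total] per distinct value
theorem pvGroup_spec_bounded :
    ∀ (n : Nat) (l : List (List Int)), l.length ≤ n → (l.map pvKey).Pairwise (· ≤ ·) →
      pvGroup l = (PySem.Set.ofList (l.map pvKey)).map (fun v => [v, pvW l v]) := by
  intro n
  induction n with
  | zero =>
    intro l hl _
    have : l = [] := List.length_eq_zero_iff.mp (Nat.le_zero.mp hl)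
    subst this; simp [pvGroup]
  | succ n ih =>
    intro l hl hp
    match l with
    | [] => simp [pvGroup]
    | it :: rest =>
      set p : List Int → Bool := fun it' => pvKey it' == pvKey it with hpdef
      have hsplit : rest.takeWhile p ++ rest.dropWhile p = rest := List.takeWhile_append_dropWhile
      have htk : ∀ x ∈ rest.takeWhile p, pvKey x = pvKey it := by
        intro x hx
        have := List.mem_takeWhile_imp hx
        simpa [hpdef, beq_iff_eq] using this
      -- every key in rest is ≥ pvKey it
      have hp' : (pvKey it :: rest.map pvKey).Pairwise (· ≤ ·) := by simpa using hp
      obtain ⟨hge', hprest⟩ := List.pairwise_cons.mp hp'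
      have hge : ∀ x ∈ rest, pvKey it ≤ pvKey x := fun x hx => hge' _ (List.mem_map_of_mem hx)
      -- keys in the dropped remainder are all ≠ pvKey it
      have hne : ∀ x ∈ rest.dropWhile p, pvKey x ≠ pvKey it := by
        intro x hx
        match hr : rest.dropWhile p with
        | [] => rw [hr] at hx; simp at hx
        | b :: rb =>
          have hb : p b = false := by
            have := List.head_dropWhile_not p (l := rest) (by simp [hr])
            simpa [hr] using this
          have hbne : pvKey b ≠ pvKey it := by simpa [hpdef, beq_iff_eq] using hb
          rw [hr] at hx
          rcases List.mem_cons.mp hx with rfl | hx'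
          · exact hbne
          · -- pvKey b ≤ pvKey x, and pvKey it ≤ pvKey b with ≠ gives pvKey it < pvKey b
            have hsub : List.Sublist ((b :: rb).map pvKey) (rest.map pvKey) := by
              rw [← hr]; exact (List.dropWhile_sublist p).map pvKey
            have hpr : (pvKey b :: rb.map pvKey).Pairwise (· ≤ ·) := by
              simpa using hprest.sublist hsub
            have hble : pvKey b ≤ pvKey x :=
              (List.pairwise_cons.mp hpr).1 _ (List.mem_map_of_mem hx')
            have hbmem : b ∈ rest := by
              have := List.dropWhile_sublist p (l := rest); rw [hr] at this
              exact this.mem (by simp)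
            have : pvKey it < pvKey b := lt_of_le_of_ne (hge b hbmem) (Ne.symm hbne)
            omega
      -- unfold one step of pvGroup via pvRun_spec
      have hstep : pvGroup (it :: rest)
          = [pvKey it, pvWt it + ((rest.takeWhile p).map pvWt).sum] :: pvGroup (rest.dropWhile p) := by
        rw [pvGroup]
        rw [pvRun_spec]
      -- IH on the remainder
      have hlen : (rest.dropWhile p).length ≤ n := by
        have h1 : (rest.dropWhile p).length ≤ rest.length := (List.dropWhile_sublist p).length_le
        have h2 : rest.length ≤ n := by simpa using Nat.lt_succ_iff.mp (Nat.lt_of_lt_of_le (by simp) hl)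
        omega
      have hpdrop : ((rest.dropWhile p).map pvKey).Pairwise (· ≤ ·) :=
        hprest.sublist ((List.dropWhile_sublist p).map pvKey)
      have hih := ih (rest.dropWhile p) hlen hpdrop
      -- Set.ofList of the key list splits off pvKey it
      have hofl : (PySem.Set.ofList ((it :: rest).map pvKey) : List Int)
          = pvKey it :: PySem.Set.ofList ((rest.dropWhile p).map pvKey) := by
        have hmap : (it :: rest).map pvKey
            = pvKey it :: ((rest.takeWhile p).map pvKey ++ (rest.dropWhile p).map pvKey) := by
          simp [← List.map_append, hsplit]
        rw [hmap]
        show List.foldl PySem.Set.add [] (pvKey it :: _) = _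
        simp only [List.foldl_cons, List.foldl_append]
        have h0 : PySem.Set.add [] (pvKey it) = [pvKey it] := rfl
        have e1 : List.foldl PySem.Set.add [pvKey it] ((rest.takeWhile p).map pvKey) = [pvKey it] :=
          pv_foldl_add_of_mem (by intro x hx; rcases List.mem_map.mp hx with ⟨y, hy, rfl⟩; simp [htk y hy])
        have e2 : List.foldl PySem.Set.add [pvKey it] ((rest.dropWhile p).map pvKey)
            = pvKey it :: List.foldl PySem.Set.add [] ((rest.dropWhile p).map pvKey) :=
          pv_foldl_add_cons (by intro hmem; rcases List.mem_map.mp hmem with ⟨y, hy, he⟩; exact hne y hy he) []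
        rw [h0, e1, e2]
        rfl
      -- weights: pvW over the whole list vs the parts
      have hWhead : pvW (it :: rest) (pvKey it) = pvWt it + ((rest.takeWhile p).map pvWt).sum := by
        have ht : (rest.takeWhile p).filter (fun it' => pvKey it' == pvKey it) = rest.takeWhile p :=
          List.filter_eq_self.mpr (fun x hx => by simp [htk x hx])
        have hd : (rest.dropWhile p).filter (fun it' => pvKey it' == pvKey it) = [] :=
          List.filter_eq_nil_iff.mpr (fun x hx => by simp [hne x hx])
        have hfr : rest.filter (fun it' => pvKey it' == pvKey it) = rest.takeWhile p := by
          conv_lhs => rw [← hsplit]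
          rw [List.filter_append, ht, hd, List.append_nil]
        unfold pvW
        rw [List.filter_cons]
        simp [hfr]
      have hWrest : ∀ v ∈ (PySem.Set.ofList ((rest.dropWhile p).map pvKey) : List Int),
          pvW (rest.dropWhile p) v = pvW (it :: rest) v := by
        intro v hv
        have hvmem : v ∈ (rest.dropWhile p).map pvKey := by
          exact (pv_ofList_sublist _).mem hv
        rcases List.mem_map.mp hvmem with ⟨y, hy, rfl⟩
        have hvne : pvKey y ≠ pvKey it := hne y hy
        have hhd : ((pvKey it == pvKey y) = false) := by simp only [beq_eq_false_iff_ne, ne_eq]; exact fun e => hvne e.symm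
        have ht : (rest.takeWhile p).filter (fun it' => pvKey it' == pvKey y) = [] :=
          List.filter_eq_nil_iff.mpr (fun x hx => by
            have := htk x hx
            simp [beq_iff_eq, this]
            exact fun e => hvne e.symm)
        have hfr : rest.filter (fun it' => pvKey it' == pvKey y)
            = (rest.dropWhile p).filter (fun it' => pvKey it' == pvKey y) := by
          conv_lhs => rw [← hsplit]
          rw [List.filter_append, ht, List.nil_append]
        unfold pvW
        rw [List.filter_cons]
        simp [hhd, hfr]
      rw [hstep, hih, hofl, List.map_cons, hWhead]
      congr 1
      exact List.map_congr_left (fun v hv => by rw [hWrest v hv])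

-- A's output characterised
theorem pvA_spec (items1 items2 : List (List Int)) :
    mergeSimilarItems items1 items2
      = (PySem.List.sorted (PySem.Set.ofList ((items1 ++ items2).map pvKey)) (fun v => v) false).map
          (fun v => [v, pvW (items1 ++ items2) v]) := by
  have hrfl : mergeSimilarItems items1 items2
      = (PySem.List.sorted (items2.foldl (fun d it => d.modify (pvKey it) 0 (· + pvWt it))
            (items1.foldl (fun d it => d.modify (pvKey it) 0 (· + pvWt it)) PySem.Dict.empty)).keys (fun v => v) false).foldl
          (fun res v => res ++ [[v, (items2.foldl (fun d it => d.modify (pvKey it) 0 (· + pvWt it))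
            (items1.foldl (fun d it => d.modify (pvKey it) 0 (· + pvWt it)) PySem.Dict.empty)).getD v 0]]) [] := rfl
  rw [hrfl, ← List.foldl_append]
  set l := items1 ++ items2
  set d := l.foldl (fun d it => d.modify (pvKey it) 0 (· + pvWt it)) PySem.Dict.empty with hd
  have hkeys : d.keys = PySem.Set.ofList (l.map pvKey) := by
    rw [hd, PySem.Dict.keys_foldl_modify_key]
    rfl
  have hget : ∀ v, d.getD v 0 = pvW l v := by
    intro v
    rw [hd, pv_getD_fold]
    simp
  rw [PySem.List.foldl_append_singleton_eq_map, hkeys]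
  simp only [List.nil_append]
  exact List.map_congr_left (fun v _ => by rw [hget v])

-- ===== VERDICT (by name: the statement is the Claim_ definition above) =====
theorem mergeSimilarItems_spec : Claim_equal_mergeSimilarItems := by
  intro items1 items2 _ _
  unfold Spec_mergeSimilarItems mergeSimilarItems_alt
  have hqperm : (PySem.List.sorted (items1 ++ items2) (fun it => pvKey it) false).Perm (items1 ++ items2) :=
    PySem.List.sorted_perm ..
  have hqpair : ((PySem.List.sorted (items1 ++ items2) (fun it => pvKey it) false).map pvKey).Pairwise (· ≤ ·) :=
    PySem.List.sorted_map_key_pairwise ..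
  rw [pvA_spec, pvGroup_spec_bounded (PySem.List.sorted (items1 ++ items2) (fun it => pvKey it) false).length _
        (le_refl _) hqpair]
  have hperm : (PySem.Set.ofList ((PySem.List.sorted (items1 ++ items2) (fun it => pvKey it) false).map pvKey) : List Int).Perm
      (PySem.Set.ofList ((items1 ++ items2).map pvKey)) := by
    rw [List.perm_ext_iff_of_nodup (PySem.Set.nodup_ofList _) (PySem.Set.nodup_ofList _)]
    intro a
    simp only [PySem.Set.mem_ofList]
    exact ⟨fun h => (hqperm.map pvKey).mem_iff.mp h, fun h => (hqperm.map pvKey).mem_iff.mpr h⟩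
  have hlt : (PySem.Set.ofList ((PySem.List.sorted (items1 ++ items2) (fun it => pvKey it) false).map pvKey) : List Int).Pairwise (· < ·) := by
    have h1 : (PySem.Set.ofList ((PySem.List.sorted (items1 ++ items2) (fun it => pvKey it) false).map pvKey) : List Int).Pairwise (· ≤ ·) :=
      hqpair.sublist (pv_ofList_sublist _)
    have h2 : (PySem.Set.ofList ((PySem.List.sorted (items1 ++ items2) (fun it => pvKey it) false).map pvKey) : List Int).Pairwise (· ≠ ·) :=
      PySem.Set.nodup_ofList _
    exact (h1.and h2).imp (fun ⟨a, b⟩ => lt_of_le_of_ne a b)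
  rw [PySem.List.sorted_eq_of_perm_of_pairwise_lt _ _ _ hperm hlt]
  exact List.map_congr_left (fun v _ => by rw [pvW_perm hqperm])
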